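-- pv_equiv track=rewrite | github.com/SingleDraw/BigDataPodcastsPipe | development/playground/stage_nlp_naive.py | preprocess_paragraphs
-- ===== SOURCE A (Python) =====
-- def preprocess_paragraphs(
--         paragraphs: list
--     ) -> list:
--     """
--     Preprocess paragraphs by cleaning text, tokenizing, removing stopwords, and lemmatizing/stemming.
--
--     Args:
--         paragraphs (list): List of paragraphs with 'text' field.
--
--     Returns:
--         list: Cleaned paragraphs.
--     """
--     cleaned_paragraphs = []
--     for paragraph in paragraphs:
--         # Lowercase
--         text = paragraph["text"].lower()
--         # Remove punctuation
--         text = ''.join(char for char in text if char.isalnum() or char.isspace())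
--         # Tokenize
--         tokens = text.split()
--         # Remove stopwords (example list)
--         stopwords_set = {"the", "is", "and", "to", "a"}
--         tokens = [word for word in tokens if word not in stopwords_set]
--         # Lemmatize or stem (example: using simple stemming)
--         tokens = [word[:-1] if word.endswith("s") else word for word in tokens]
--
--         paragraph["text"] = ' '.join(tokens)
--         cleaned_paragraphs.append(paragraph)
--
--     return cleaned_paragraphs
-- ===== SOURCE B (Python) =====
-- def preprocess_paragraphs(
--         paragraphs: list
--     ) -> list:
--     stopwords = {"the", "is", "and", "to", "a"}
--     for paragraph in paragraphs:
--         kept = []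
--         for word in paragraph["text"].lower().split():
--             cleaned = ''.join(ch for ch in word if ch.isalnum() or ch.isspace())
--             if not cleaned or cleaned in stopwords:
--                 continue
--             kept.append(cleaned.removesuffix("s"))
--         paragraph["text"] = ' '.join(kept)
--     return paragraphs
-- ===== Notes on version B (the rewrite author's own statement) =====
-- stated objective: simpler
-- what changed: A's four separate passes (whole-text punctuation strip, split, stopword filter pass, stemming map pass) are fused into one per-word pass over the words of the lowercased text: clean the word, drop it if empty or a stopword, stem with removesuffix('s').
import Mathlib
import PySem

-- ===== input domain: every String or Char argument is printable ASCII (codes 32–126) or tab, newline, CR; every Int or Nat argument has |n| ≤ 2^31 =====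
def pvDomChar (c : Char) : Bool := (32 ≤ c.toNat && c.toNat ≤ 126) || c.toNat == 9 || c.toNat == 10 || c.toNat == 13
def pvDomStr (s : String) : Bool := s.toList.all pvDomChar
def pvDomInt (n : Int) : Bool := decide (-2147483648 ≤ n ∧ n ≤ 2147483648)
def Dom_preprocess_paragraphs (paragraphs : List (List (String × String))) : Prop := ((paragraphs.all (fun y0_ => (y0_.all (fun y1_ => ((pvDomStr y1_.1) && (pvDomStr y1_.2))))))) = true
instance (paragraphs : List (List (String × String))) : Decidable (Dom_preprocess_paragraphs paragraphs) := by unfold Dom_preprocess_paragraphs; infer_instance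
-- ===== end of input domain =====

-- B fuses A's whole-text punctuation pass and the two token-list passes into one
-- per-word pass (clean, drop-if-empty, stopword check, stem) over the words of the
-- lowercased text; same in-place "text" update of each paragraph dict (return value proved).

-- the stopword set literal {"the", "is", "and", "to", "a"} (shared data constant)
def pvStopSet : PySem.Set (List Char) :=
  PySem.Set.ofList ["the".toList, "is".toList, "and".toList, "to".toList, "a".toList]

-- ===== PORT A =====
def preprocess_paragraphs (paragraphs : List (List (String × String))) : List (List (String × String)) :=
  let cleaned_paragraphs : List (List (String × String)) := []
  let cleaned_paragraphs := paragraphs.foldl (fun cleaned_paragraphs paragraph =>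
    match PySem.Dict.get? (PySem.Dict.mk paragraph) "text" with
    | none => cleaned_paragraphs ++ [paragraph]   -- paragraph["text"]: KeyError in Python; outside Pre_
    | some t =>
      -- Lowercase
      let text := PySem.Chars.lower t.toList
      -- Remove punctuation: ''.join(char for char in text if char.isalnum() or char.isspace())
      let text := text.filter (fun char => PySem.Chars.isalnum char || PySem.Chars.isspace char)
      -- Tokenize
      let tokens := PySem.Chars.split₀ text
      -- Remove stopwords
      let tokens := tokens.filter (fun word => !(PySem.Set.contains pvStopSet word))
      -- Stem: word[:-1] if word.endswith("s") else word
      let tokens := tokens.map (fun word =>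
        if PySem.Chars.endswith word ['s'] then PySem.List.slice word none (some (-1)) else word)
      -- paragraph["text"] = ' '.join(tokens)
      let paragraph := (PySem.Dict.insert (PySem.Dict.mk paragraph) "text"
        (String.ofList (PySem.Chars.join [' '] tokens))).items
      cleaned_paragraphs ++ [paragraph]) cleaned_paragraphs
  cleaned_paragraphs

-- ===== PORT B =====
-- the body of B's inner loop: one word in, the kept stemmed word out (continue = none)
def pvProcWord (word : List Char) : Option (List Char) :=
  let cleaned := word.filter (fun ch => PySem.Chars.isalnum ch || PySem.Chars.isspace ch)
  if cleaned.isEmpty || PySem.Set.contains pvStopSet cleaned then none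
  else some (if PySem.Chars.endswith cleaned ['s'] then cleaned.dropLast else cleaned)  -- removesuffix("s")

def preprocess_paragraphs_alt (paragraphs : List (List (String × String))) : List (List (String × String)) :=
  paragraphs.map (fun paragraph =>
    match PySem.Dict.get? (PySem.Dict.mk paragraph) "text" with
    | none => paragraph   -- paragraph["text"]: KeyError in Python; outside Pre_
    | some t =>
      let kept := (PySem.Chars.split₀ (PySem.Chars.lower t.toList)).filterMap pvProcWord
      (PySem.Dict.insert (PySem.Dict.mk paragraph) "text"
        (String.ofList (PySem.Chars.join [' '] kept))).items)

-- ===== PRECONDITION & SPEC =====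
-- Pre_: every paragraph dict has a "text" key — on a paragraph without one the
-- Python A (and the Python B alike) raises KeyError at paragraph["text"].
def Pre_preprocess_paragraphs (paragraphs : List (List (String × String))) : Prop :=
  ∀ p ∈ paragraphs, (PySem.Dict.get? (PySem.Dict.mk p) "text").isSome = true
instance (paragraphs : List (List (String × String))) : Decidable (Pre_preprocess_paragraphs paragraphs) := by unfold Pre_preprocess_paragraphs; infer_instance
def pvWitness_preprocess_paragraphs : (List (List (String × String))) :=
  [[("text", "The cats And a Dog!"), ("id", "1")], [("text", "  ")]]

def Spec_preprocess_paragraphs (paragraphs : List (List (String × String))) (out : List (List (String × String))) : Prop := out = preprocess_paragraphs_alt paragraphs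
instance (paragraphs : List (List (String × String))) (out : List (List (String × String))) : Decidable (Spec_preprocess_paragraphs paragraphs out) := by unfold Spec_preprocess_paragraphs; infer_instance

-- ===== CLAIM (what is proved, stated in full; the proofs are below) =====
def Claim_equal_preprocess_paragraphs : Prop := ∀ (paragraphs : List (List (String × String))), Dom_preprocess_paragraphs paragraphs → Pre_preprocess_paragraphs paragraphs → Spec_preprocess_paragraphs paragraphs (preprocess_paragraphs paragraphs)

-- ===== LEMMAS AND PROOFS =====

lemma split0_go_eq (s cur : List Char) (acc : List (List Char)) :
    PySem.Chars.split₀.go s cur acc =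
      acc.reverse ++ (List.splitOnP.go PySem.Chars.isspace s cur).filter (fun w => !w.isEmpty) := by
  induction s generalizing cur acc with
  | nil =>
    simp only [PySem.Chars.split₀.go, List.splitOnP.go]
    by_cases h : cur.isEmpty <;> simp [h]
  | cons c rest ih =>
    simp only [PySem.Chars.split₀.go, List.splitOnP.go]
    by_cases hs : PySem.Chars.isspace c
    · by_cases h : cur.isEmpty <;> simp [hs, h, ih]
    · simp [hs, ih]

lemma split0_eq (cs : List Char) :
    PySem.Chars.split₀ cs = (cs.splitOnP PySem.Chars.isspace).filter (fun w => !w.isEmpty) := by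
  simpa [PySem.Chars.split₀, List.splitOnP] using split0_go_eq cs [] []

lemma splitOnP_filter (p keep : Char → Bool) (h : ∀ c, p c = true → keep c = true) (cs : List Char) :
    (cs.filter keep).splitOnP p = (cs.splitOnP p).map (List.filter keep) := by
  induction cs with
  | nil => simp
  | cons c rest ih =>
    by_cases hp : p c
    · have hk : keep c := h c hp
      simp [hk, List.splitOnP_cons, hp, ih]
    · obtain ⟨w, t, he⟩ := List.exists_cons_of_ne_nil (List.splitOnP_ne_nil p rest)
      by_cases hk : keep c <;>
        simp [hk, List.splitOnP_cons, hp, ih, he]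

lemma passes_eq_filterMap (l : List (List Char)) :
    (((l.map (List.filter (fun ch => PySem.Chars.isalnum ch || PySem.Chars.isspace ch))).filter
        (fun w => !w.isEmpty)).filter (fun word => !(PySem.Set.contains pvStopSet word))).map
      (fun word => if PySem.Chars.endswith word ['s'] then PySem.List.slice word none (some (-1)) else word)
    = (l.filter (fun w => !w.isEmpty)).filterMap pvProcWord := by
  induction l with
  | nil => simp
  | cons w t ih =>
    simp only [List.map_cons, List.filter_cons]
    set c := w.filter (fun ch => PySem.Chars.isalnum ch || PySem.Chars.isspace ch) with hc
    by_cases hw : w.isEmpty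
    · have hce : c.isEmpty := by
        rw [List.isEmpty_iff] at hw ⊢; simp [hc, hw]
      simp only [hw, hce, Bool.not_true, Bool.false_eq_true, if_false, ih]
    · simp only [hw, Bool.not_false, if_true, List.filterMap_cons]
      by_cases hce : c.isEmpty
      · have hp : pvProcWord w = none := by
          simp only [pvProcWord, ← hc, hce, Bool.true_or, if_true]
        simp only [hce, Bool.not_true, Bool.false_eq_true, if_false, hp, ih]
      · by_cases hstop : PySem.Set.contains pvStopSet c
        · have hp : pvProcWord w = none := by
            simp only [pvProcWord, ← hc, hce, hstop, Bool.or_true, if_true]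
          simp only [hce, Bool.not_false, if_true, List.filter_cons, hstop, Bool.not_true, Bool.false_eq_true,
            if_false, hp, ih]
        · have hstop' : c ∉ pvStopSet := by simpa using hstop
          have hp : pvProcWord w =
              some (if PySem.Chars.endswith c ['s'] then c.dropLast else c) := by
            simp [pvProcWord, ← hc, hce, hstop']
          have ih2 := ih
          simp [PySem.List.slice_to_neg_one] at ih2
          simp [hce, hstop', hp, ih2, PySem.List.slice_to_neg_one]

-- the per-paragraph text computations agree
lemma text_eq (t : String) :
    (((PySem.Chars.split₀
        ((PySem.Chars.lower t.toList).filter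
          (fun char => PySem.Chars.isalnum char || PySem.Chars.isspace char))).filter
        (fun word => !(PySem.Set.contains pvStopSet word))).map
      (fun word => if PySem.Chars.endswith word ['s'] then PySem.List.slice word none (some (-1)) else word))
    = (PySem.Chars.split₀ (PySem.Chars.lower t.toList)).filterMap pvProcWord := by
  rw [split0_eq, split0_eq,
    splitOnP_filter PySem.Chars.isspace _ (fun c h => by simp [h]) (PySem.Chars.lower t.toList),
    passes_eq_filterMap]

-- A's append-loop over the paragraphs, with a generalized accumulator, equals B's map
lemma fold_eq_map (l : List (List (String × String))) (acc : List (List (String × String))) :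
    l.foldl (fun cleaned_paragraphs paragraph =>
      match PySem.Dict.get? (PySem.Dict.mk paragraph) "text" with
      | none => cleaned_paragraphs ++ [paragraph]
      | some t =>
        let text := PySem.Chars.lower t.toList
        let text := text.filter (fun char => PySem.Chars.isalnum char || PySem.Chars.isspace char)
        let tokens := PySem.Chars.split₀ text
        let tokens := tokens.filter (fun word => !(PySem.Set.contains pvStopSet word))
        let tokens := tokens.map (fun word =>
          if PySem.Chars.endswith word ['s'] then PySem.List.slice word none (some (-1)) else word)
        let paragraph := (PySem.Dict.insert (PySem.Dict.mk paragraph) "text"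
          (String.ofList (PySem.Chars.join [' '] tokens))).items
        cleaned_paragraphs ++ [paragraph]) acc
    = acc ++ l.map (fun paragraph =>
      match PySem.Dict.get? (PySem.Dict.mk paragraph) "text" with
      | none => paragraph
      | some t =>
        let kept := (PySem.Chars.split₀ (PySem.Chars.lower t.toList)).filterMap pvProcWord
        (PySem.Dict.insert (PySem.Dict.mk paragraph) "text"
          (String.ofList (PySem.Chars.join [' '] kept))).items) := by
  induction l generalizing acc with
  | nil => simp
  | cons p rest ih =>
    simp only [List.foldl_cons, List.map_cons]
    cases h : PySem.Dict.get? (PySem.Dict.mk p) "text" with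
    | none =>
      simp only [h]
      rw [ih]
      simp
    | some t =>
      simp only [h]
      rw [ih, text_eq t]
      simp

-- ===== VERDICT (by name: the statement is the Claim_ definition above) =====
theorem preprocess_paragraphs_spec : Claim_equal_preprocess_paragraphs := by
  intro paragraphs _ _
  show _ = _
  unfold preprocess_paragraphs preprocess_paragraphs_alt
  simpa using fold_eq_map paragraphs []
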